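-- pv_equiv track=rewrite | github.com/Aasthaengg/IBMdataset | Python_codes/p03228/s449214010.py | solve
-- ===== SOURCE A (Python) =====
-- def solve(a, b, k):
--     for i in range(k):
--         if i % 2 == 0:
--             if a % 2 == 1:
--                 a -= 1
--             b += a // 2
--             a //= 2
--         else:
--             if b % 2 == 1:
--                 b -= 1
--             a += b // 2
--             b //= 2
--     return "%d %d" % (a, b)
-- ===== SOURCE B (Python) =====
-- def solve(a, b, k):
--     # Brent-style shortcut: record each (parity, a, b) state; on first repeat,
--     # skip whole cycles with modular arithmetic and play out only the remainder.
--     seen = {}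
--     i = 0
--     while i < k:
--         key = (i & 1, a, b)
--         j = seen.get(key)
--         if j is not None:
--             c = i - j
--             r = (k - i) % c
--             for _ in range(r):
--                 if i & 1 == 0:
--                     a, b = a // 2, b + a // 2
--                 else:
--                     a, b = a + b // 2, b // 2
--                 i += 1
--             break
--         seen[key] = i
--         if i & 1 == 0:
--             a, b = a // 2, b + a // 2
--         else:
--             a, b = a + b // 2, b // 2
--         i += 1
--     return "%d %d" % (a, b)
-- ===== Notes on version B (the rewrite author's own statement) =====
-- stated objective: faster
-- what changed: B replaces A's k-step simulation by cycle detection: it records each (parity, a, b) state in a dict, and on the first repeated state skips all full cycles with modular arithmetic and plays out only the remainder; the per-step odd-decrement of A is also folded into plain floor division.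
import Mathlib
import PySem

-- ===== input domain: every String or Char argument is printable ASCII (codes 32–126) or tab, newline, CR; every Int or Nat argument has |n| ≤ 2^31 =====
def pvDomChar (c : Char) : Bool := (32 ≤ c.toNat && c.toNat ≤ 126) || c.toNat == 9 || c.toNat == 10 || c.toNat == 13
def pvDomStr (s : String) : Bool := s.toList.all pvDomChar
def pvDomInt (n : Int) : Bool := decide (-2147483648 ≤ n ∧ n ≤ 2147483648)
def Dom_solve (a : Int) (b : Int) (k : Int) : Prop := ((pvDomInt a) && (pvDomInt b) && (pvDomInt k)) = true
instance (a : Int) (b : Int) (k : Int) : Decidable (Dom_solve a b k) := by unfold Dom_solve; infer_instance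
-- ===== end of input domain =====

-- B replaces A's O(k) step-by-step simulation by state-cycle detection with a modular skip; proved to return the same string.

-- ===== PORT A =====
-- one iteration of A's loop body at index i (branches in A's order)
def stepA (i : Int) (s : Int × Int) : Int × Int :=
  if PySem.Int.mod i 2 == 0 then
    let a := if PySem.Int.mod s.1 2 == 1 then s.1 - 1 else s.1
    (PySem.Int.floordiv a 2, s.2 + PySem.Int.floordiv a 2)
  else
    let b := if PySem.Int.mod s.2 2 == 1 then s.2 - 1 else s.2
    (s.1 + PySem.Int.floordiv b 2, PySem.Int.floordiv b 2)

def solve (a : Int) (b : Int) (k : Int) : String :=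
  let s := (PySem.List.pyRange 0 k 1).foldl (fun s i => stepA i s) (a, b)
  PySem.Int.toStr s.1 ++ " " ++ PySem.Int.toStr s.2

-- ===== PORT B =====
-- one step of B at index i ('a, b = a // 2, b + a // 2' resp. the mirrored pair)
def stepB (i : Int) (s : Int × Int) : Int × Int :=
  if PySem.Int.band i 1 == 0 then (PySem.Int.floordiv s.1 2, s.2 + PySem.Int.floordiv s.1 2)
  else (s.1 + PySem.Int.floordiv s.2 2, PySem.Int.floordiv s.2 2)

-- the 'for _ in range(r)' remainder loop after the modular skip
def remB (r : Nat) (i : Int) (s : Int × Int) : Int × Int :=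
  match r with
  | 0 => s
  | r + 1 => remB r (i + 1) (stepB i s)

-- the 'while i < k' loop with the seen-dict
def goB (k : Int) (i : Int) (s : Int × Int) (seen : PySem.Dict (Int × Int × Int) Int) : Int × Int :=
  if _h : i < k then
    match seen.get? (PySem.Int.band i 1, s.1, s.2) with
    | some j =>
      let c := i - j
      remB (PySem.Int.mod (k - i) c).toNat i s
    | none => goB k (i + 1) (stepB i s) (seen.insert (PySem.Int.band i 1, s.1, s.2) i)
  else s
termination_by (k - i).toNat
decreasing_by omega

def solve_alt (a : Int) (b : Int) (k : Int) : String :=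
  let s := goB k 0 (a, b) PySem.Dict.empty
  PySem.Int.toStr s.1 ++ " " ++ PySem.Int.toStr s.2

-- ===== PRECONDITION & SPEC =====
def Spec_solve (a : Int) (b : Int) (k : Int) (out : String) : Prop := out = solve_alt a b k
instance (a : Int) (b : Int) (k : Int) (out : String) : Decidable (Spec_solve a b k out) := by unfold Spec_solve; infer_instance

-- ===== CLAIM (what is proved, stated in full; the proofs are below) =====
def Claim_equal_solve : Prop := ∀ (a : Int) (b : Int) (k : Int), Dom_solve a b k → Spec_solve a b k (solve a b k)

-- ===== LEMMAS AND PROOFS =====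

-- n steps of the process starting at index i (proof-side reference semantics)
def iterS (i : Int) (n : Nat) (s : Int × Int) : Int × Int :=
  match n with
  | 0 => s
  | n + 1 => iterS (i + 1) n (stepB i s)

theorem floordiv_pred_of_odd (a : Int) (h : PySem.Int.mod a 2 = 1) :
    PySem.Int.floordiv (a - 1) 2 = PySem.Int.floordiv a 2 := by
  rw [PySem.Int.floordiv_eq_ediv_of_pos (by norm_num), PySem.Int.floordiv_eq_ediv_of_pos (by norm_num)]
  rw [PySem.Int.mod_eq_emod_of_pos (by norm_num)] at h
  omega

theorem halve_adjust (x : Int) :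
    PySem.Int.floordiv (if PySem.Int.mod x 2 = 1 then x - 1 else x) 2 = PySem.Int.floordiv x 2 := by
  by_cases h1 : PySem.Int.mod x 2 = 1
  · simp only [h1, if_true]
    exact floordiv_pred_of_odd x h1
  · simp only [h1, if_false]

theorem stepA_eq_stepB (i : Int) (s : Int × Int) : stepA i s = stepB i s := by
  unfold stepA stepB
  rw [PySem.Int.band_one]
  by_cases h0 : PySem.Int.mod i 2 = 0
  · simp only [beq_iff_eq, h0, if_true, halve_adjust]
  · simp only [beq_iff_eq, h0, if_false, halve_adjust]

theorem remB_eq_iterS (r : Nat) (i : Int) (s : Int × Int) : remB r i s = iterS i r s := by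
  induction r generalizing i s with
  | zero => rfl
  | succ r ih => simp [remB, iterS, ih]

theorem mod_two_succ (i j : Int) (h : PySem.Int.mod i 2 = PySem.Int.mod j 2) :
    PySem.Int.mod (i + 1) 2 = PySem.Int.mod (j + 1) 2 := by
  simp only [PySem.Int.mod_eq_emod_of_pos (show (0:Int) < 2 by norm_num)] at h ⊢
  omega

theorem iterS_parity (n : Nat) (i j : Int) (s : Int × Int)
    (h : PySem.Int.mod i 2 = PySem.Int.mod j 2) : iterS i n s = iterS j n s := by
  induction n generalizing i j s with
  | zero => rfl
  | succ n ih =>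
    have hstep : stepB i s = stepB j s := by
      unfold stepB; rw [PySem.Int.band_one, PySem.Int.band_one, h]
    simp only [iterS, hstep]
    exact ih (i + 1) (j + 1) (stepB j s) (mod_two_succ i j h)

theorem iterS_add (m n : Nat) (i : Int) (s : Int × Int) :
    iterS i (m + n) s = iterS (i + (m : Int)) n (iterS i m s) := by
  induction m generalizing i s with
  | zero => simp [iterS]
  | succ m ih =>
    have : m + 1 + n = m + n + 1 := by omega
    rw [this]
    show iterS (i + 1) (m + n) (stepB i s) = _
    rw [ih (i + 1) (stepB i s)]
    have : i + 1 + (m : Int) = i + ((m : Nat) + 1 : Nat) := by push_cast; ring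
    rw [this]
    rfl

theorem iterS_succ_right (n : Nat) (i : Int) (s : Int × Int) :
    iterS i (n + 1) s = stepB (i + (n : Int)) (iterS i n s) := by
  induction n generalizing i s with
  | zero => simp [iterS]
  | succ n ih =>
    show iterS (i + 1) (n + 1) (stepB i s) = _
    rw [ih (i + 1) (stepB i s)]
    have : i + 1 + (n : Int) = i + ((n : Nat) + 1 : Nat) := by push_cast; ring
    rw [this]
    rfl

theorem mod_two_add_even (i : Int) (c : Nat) (hc : c % 2 = 0) :
    PySem.Int.mod (i + (c : Int)) 2 = PySem.Int.mod i 2 := by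
  simp only [PySem.Int.mod_eq_emod_of_pos (show (0:Int) < 2 by norm_num)]
  omega

theorem iterS_cycle (c : Nat) (i : Int) (s : Int × Int)
    (hc : 0 < c) (hce : c % 2 = 0) (hcy : iterS i c s = s) :
    ∀ n, iterS i n s = iterS i (n % c) s := by
  intro n
  induction n using Nat.strong_induction_on with
  | _ n ih =>
    by_cases hn : n < c
    · rw [Nat.mod_eq_of_lt hn]
    · have hsplit : n = c + (n - c) := by omega
      have h1 : iterS i n s = iterS i (n - c) s := by
        conv_lhs => rw [hsplit]
        rw [iterS_add c (n - c) i s, hcy,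
          iterS_parity (n - c) (i + (c : Int)) i s (mod_two_add_even i c hce)]
      have h2 : n % c = (n - c) % c := by
        conv_lhs => rw [hsplit]
        rw [Nat.add_mod_left]
      rw [h1, ih (n - c) (by omega), h2]

theorem foldA_eq_iterS (k : Int) : ∀ (i : Int) (s : Int × Int),
    (PySem.List.pyRange i k 1).foldl (fun s j => stepA j s) s = iterS i (k - i).toNat s := by
  intro i s
  by_cases h : i < k
  · have hm : (k - i).toNat = (k - (i + 1)).toNat + 1 := by omega
    rw [PySem.List.pyRange_one_cons h, List.foldl_cons, hm]
    show _ = iterS (i + 1) ((k - (i + 1)).toNat) (stepB i s)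
    rw [← stepA_eq_stepB]
    exact foldA_eq_iterS k (i + 1) (stepA i s)
  · have : (k - i).toNat = 0 := by omega
    rw [PySem.List.pyRange_one_eq_nil (by omega), this]
    rfl
termination_by i => (k - i).toNat
decreasing_by omega

theorem goB_eq_iterS (k : Int) (s0 : Int × Int) :
    ∀ (i : Int) (s : Int × Int) (seen : PySem.Dict (Int × Int × Int) Int),
    0 ≤ i → (i = 0 ∨ i ≤ k) → s = iterS 0 i.toNat s0 →
    (∀ key j, seen.get? key = some j →
      0 ≤ j ∧ j < i ∧ key.1 = PySem.Int.mod j 2 ∧ (key.2.1, key.2.2) = iterS 0 j.toNat s0) →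
    goB k i s seen = iterS 0 k.toNat s0 := by
  intro i s seen hi0 hik hs hinv
  rw [goB]
  by_cases h : i < k
  · simp only [h, dif_pos]
    cases hget : seen.get? (PySem.Int.band i 1, s.1, s.2) with
    | some j =>
      simp only []
      obtain ⟨hj0, hji, hjp, hjs⟩ := hinv _ j hget
      -- current state equals the state first seen at index j
      have hsj : s = iterS 0 j.toNat s0 := by
        rw [← hjs]
      have hpar : PySem.Int.mod i 2 = PySem.Int.mod j 2 := by
        rw [← PySem.Int.band_one i]
        exact hjp
      -- cycle of length c := (i - j).toNat, even and positive
      set c : Nat := (i - j).toNat with hc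
      have hcpos : 0 < c := by omega
      have hceven : c % 2 = 0 := by
        have := hpar
        simp only [PySem.Int.mod_eq_emod_of_pos (show (0:Int) < 2 by norm_num)] at this
        omega
      have hcycJ : iterS j c s = s := by
        have h1 : iterS 0 i.toNat s0 = iterS ((j.toNat : Int)) c (iterS 0 j.toNat s0) := by
          have : i.toNat = j.toNat + c := by omega
          rw [this, iterS_add j.toNat c 0 s0]
          simp
        have hjc : ((j.toNat : Int)) = j := by omega
        rw [hjc, ← hsj] at h1
        rw [← h1, ← hs]
      -- the remainder count
      have hr : (PySem.Int.mod (k - i) (i - j)).toNat = (k - i).toNat % c := by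
        rw [PySem.Int.mod_eq_emod_of_pos (by omega)]
        have h2 : (((k - i).toNat % c : Nat) : Int) = (k - i) % (i - j) := by
          rw [Int.natCast_mod, hc, Int.toNat_of_nonneg (by omega : (0:Int) ≤ k - i),
            Int.toNat_of_nonneg (by omega : (0:Int) ≤ i - j)]
        rw [← h2, Int.toNat_natCast]
      rw [remB_eq_iterS, hr]
      have hk1 : iterS 0 k.toNat s0 = iterS i (k - i).toNat s := by
        have : k.toNat = i.toNat + (k - i).toNat := by omega
        rw [this, iterS_add i.toNat ((k - i).toNat) 0 s0, ← hs]
        congr 1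
        omega
      have hk2 : iterS i (k - i).toNat s = iterS j (k - i).toNat s :=
        iterS_parity _ i j s hpar
      have hk3 : iterS j (k - i).toNat s = iterS j ((k - i).toNat % c) s :=
        iterS_cycle c j s hcpos hceven hcycJ _
      have hk4 : iterS j ((k - i).toNat % c) s = iterS i ((k - i).toNat % c) s :=
        iterS_parity _ j i s hpar.symm
      rw [hk1, hk2, hk3, hk4]
    | none =>
      simp only []
      apply goB_eq_iterS k s0 (i + 1) (stepB i s) _ (by omega) (Or.inr (by omega))
      · have : (i + 1).toNat = i.toNat + 1 := by omega
        rw [this, iterS_succ_right i.toNat 0 s0, ← hs]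
        congr 1
        omega
      · intro key j hkey
        rw [PySem.Dict.get?_insert] at hkey
        split at hkey
        · rename_i heq
          injection hkey with hji
          subst heq
          refine ⟨by omega, by omega, ?_, ?_⟩
          · show PySem.Int.band i 1 = PySem.Int.mod j 2
            rw [← hji, PySem.Int.band_one]
          · show (s.1, s.2) = iterS 0 j.toNat s0
            rw [← hji, ← hs]
        · obtain ⟨h1, h2, h3, h4⟩ := hinv key j hkey
          exact ⟨h1, by omega, h3, h4⟩
  · simp only [h, dif_neg, not_false_iff]
    have : i.toNat = k.toNat := by omega
    rw [hs, this]
termination_by i => (k - i).toNat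
decreasing_by omega

-- ===== VERDICT (by name: the statement is the Claim_ definition above) =====
theorem solve_spec : Claim_equal_solve := by
  unfold Claim_equal_solve
  intro a b k _
  unfold Spec_solve solve solve_alt
  have hA : (PySem.List.pyRange 0 k 1).foldl (fun s j => stepA j s) (a, b)
      = iterS 0 (k - 0).toNat (a, b) := foldA_eq_iterS k 0 (a, b)
  have hB : goB k 0 (a, b) PySem.Dict.empty = iterS 0 k.toNat (a, b) := by
    apply goB_eq_iterS k (a, b) 0 (a, b) PySem.Dict.empty le_rfl (Or.inl rfl) rfl
    intro key j hkey
    simp [PySem.Dict.get?_empty] at hkey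
  simp only []
  rw [hA, hB]
  norm_num
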